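-- pv_equiv track=rewrite | github.com/mumuvrf/Academia-Python | Aula 8/quadro_de_medalhas.py | mais_medalhas
-- ===== SOURCE A (Python) =====
-- def mais_medalhas(medalha, quadro_medalhas):
--     filtro = {}
--     maior_numero = 0
--     for pais in quadro_medalhas.keys():
--         if quadro_medalhas[pais][medalha] > maior_numero:
--             maior_numero = quadro_medalhas[pais][medalha]
--
--     for pais in quadro_medalhas.keys():
--         if quadro_medalhas[pais][medalha] == maior_numero:
--             filtro[pais] = quadro_medalhas[pais]
--     return filtro
-- ===== SOURCE B (Python) =====
-- def mais_medalhas(medalha, quadro_medalhas):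
--     # single stateful pass: running maximum + running filter dict
--     maior_numero = 0
--     filtro = {}
--     for pais, medals in quadro_medalhas.items():
--         n = medals[medalha]
--         if n > maior_numero:
--             maior_numero = n
--             filtro = {pais: medals}
--         elif n == maior_numero:
--             filtro[pais] = medals
--     return filtro
-- ===== Notes on version B (the rewrite author's own statement) =====
-- stated objective: alternative
-- what changed: Replaces A's two scans (one to find the maximum medal count, one to collect the countries attaining it) by a single stateful pass that keeps the running maximum and resets/extends the running filter dict.
import Mathlib
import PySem

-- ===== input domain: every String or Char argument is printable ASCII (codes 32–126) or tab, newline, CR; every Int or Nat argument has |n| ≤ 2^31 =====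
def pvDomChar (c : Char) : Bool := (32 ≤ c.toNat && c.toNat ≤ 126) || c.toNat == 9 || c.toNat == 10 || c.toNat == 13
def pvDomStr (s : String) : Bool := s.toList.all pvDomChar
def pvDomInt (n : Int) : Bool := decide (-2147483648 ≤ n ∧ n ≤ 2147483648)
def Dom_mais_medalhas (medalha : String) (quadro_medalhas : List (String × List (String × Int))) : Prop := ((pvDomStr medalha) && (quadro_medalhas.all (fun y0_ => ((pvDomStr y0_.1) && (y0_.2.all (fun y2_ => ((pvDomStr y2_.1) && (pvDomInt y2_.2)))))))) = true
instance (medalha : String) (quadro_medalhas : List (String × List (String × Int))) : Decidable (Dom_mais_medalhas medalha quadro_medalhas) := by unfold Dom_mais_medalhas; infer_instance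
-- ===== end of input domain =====

-- B replaces A's two scans of the medal table by one stateful pass (running maximum + running filter dict); alternative decomposition, same result.


-- ===== PORT A =====
-- marshalling at the boundary: the Python argument is a dict of dicts, built here with PySem.Dict.ofList
def mmDict (quadro_medalhas : List (String × List (String × Int))) : PySem.Dict String (PySem.Dict String Int) :=
  PySem.Dict.ofList (quadro_medalhas.map (fun pr => (pr.1, PySem.Dict.ofList pr.2)))

-- quadro_medalhas[pais][medalha] (Pre_ guarantees the keys exist; a missing key is a Python KeyError, excluded by Pre_)
def mmLookup (Q : PySem.Dict String (PySem.Dict String Int)) (pais medalha : String) : Int :=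
  (((PySem.Dict.get? Q pais).getD PySem.Dict.empty).get? medalha).getD 0

def mais_medalhas (medalha : String) (quadro_medalhas : List (String × List (String × Int))) : List (String × List (String × Int)) :=
  let Q := mmDict quadro_medalhas
  -- first loop: maior_numero
  let maior : Int := (PySem.Dict.keys Q).foldl
    (fun m pais => if mmLookup Q pais medalha > m then mmLookup Q pais medalha else m) 0
  -- second loop: filtro
  let filtro : PySem.Dict String (PySem.Dict String Int) := (PySem.Dict.keys Q).foldl
    (fun f pais => if mmLookup Q pais medalha = maior
                   then PySem.Dict.insert f pais ((PySem.Dict.get? Q pais).getD PySem.Dict.empty) else f)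
    PySem.Dict.empty
  (PySem.Dict.items filtro).map (fun pr => (pr.1, PySem.Dict.items pr.2))

-- ===== PORT B =====
def mais_medalhas_alt (medalha : String) (quadro_medalhas : List (String × List (String × Int))) : List (String × List (String × Int)) :=
  let Q := mmDict quadro_medalhas
  let st := (PySem.Dict.items Q).foldl
    (fun (st : Int × PySem.Dict String (PySem.Dict String Int)) pr =>
      let n := (pr.2.get? medalha).getD 0
      if n > st.1 then (n, PySem.Dict.insert PySem.Dict.empty pr.1 pr.2)
      else if n = st.1 then (st.1, PySem.Dict.insert st.2 pr.1 pr.2)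
      else st)
    (0, PySem.Dict.empty)
  (PySem.Dict.items st.2).map (fun pr => (pr.1, PySem.Dict.items pr.2))

-- ===== PRECONDITION & SPEC =====
-- A raises KeyError iff some country's (surviving, after duplicate-key overwrite) medal dict lacks medalha; exactly those inputs are excluded.
def Pre_mais_medalhas (medalha : String) (quadro_medalhas : List (String × List (String × Int))) : Prop :=
  ∀ v ∈ (PySem.Dict.ofList quadro_medalhas).values, medalha ∈ v.map Prod.fst
instance (medalha : String) (quadro_medalhas : List (String × List (String × Int))) : Decidable (Pre_mais_medalhas medalha quadro_medalhas) := by unfold Pre_mais_medalhas; infer_instance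

def pvWitness_mais_medalhas : String × (List (String × List (String × Int))) :=
  ("ouro", [("Brasil", [("ouro", 3), ("prata", 1)]), ("Chile", [("ouro", 3)])])

def Spec_mais_medalhas (medalha : String) (quadro_medalhas : List (String × List (String × Int))) (out : List (String × List (String × Int))) : Prop := out = mais_medalhas_alt medalha quadro_medalhas
instance (medalha : String) (quadro_medalhas : List (String × List (String × Int))) (out : List (String × List (String × Int))) : Decidable (Spec_mais_medalhas medalha quadro_medalhas out) := by unfold Spec_mais_medalhas; infer_instance

-- ===== CLAIM (what is proved, stated in full; the proofs are below) =====
def Claim_equal_mais_medalhas : Prop := ∀ (medalha : String) (quadro_medalhas : List (String × List (String × Int))), Dom_mais_medalhas medalha quadro_medalhas → Pre_mais_medalhas medalha quadro_medalhas → Spec_mais_medalhas medalha quadro_medalhas (mais_medalhas medalha quadro_medalhas)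

-- ===== LEMMAS AND PROOFS =====

-- medal count of one item
def mmCnt (medalha : String) (pr : String × PySem.Dict String Int) : Int :=
  (pr.2.get? medalha).getD 0

-- Bool test "this item's count equals M" (named so that every filter carries the same Decidable instance)
def mmIs (medalha : String) (M : Int) (pr : String × PySem.Dict String Int) : Bool :=
  decide (mmCnt medalha pr = M)

-- the running maximum over a list of items
def mmMax (medalha : String) (l : List (String × PySem.Dict String Int)) : Int :=
  l.foldl (fun m pr => if mmCnt medalha pr > m then mmCnt medalha pr else m) 0

theorem mmMax_le (medalha : String) (l : List (String × PySem.Dict String Int)) :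
    ∀ a : Int, a ≤ l.foldl (fun m pr => if mmCnt medalha pr > m then mmCnt medalha pr else m) a ∧
      ∀ pr ∈ l, mmCnt medalha pr ≤ l.foldl (fun m pr => if mmCnt medalha pr > m then mmCnt medalha pr else m) a := by
  induction l with
  | nil => intro a; simp
  | cons x xs ih =>
    intro a
    simp only [List.foldl_cons, List.mem_cons]
    constructor
    · refine le_trans ?_ ((ih _).1)
      split_ifs with h <;> omega
    · rintro pr (rfl | hm)
      · refine le_trans ?_ ((ih _).1)
        split_ifs with h <;> omega
      · exact (ih _).2 pr hm

theorem foldl_if_eq_foldl_filter {α β : Type} (c : α → Bool) (g : β → α → β) :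
    ∀ (l : List α) (acc : β),
      l.foldl (fun f x => if c x then g f x else f) acc = (l.filter c).foldl g acc := by
  intro l
  induction l with
  | nil => intro acc; simp
  | cons x xs ih =>
    intro acc
    by_cases h : c x = true <;> simp [h, ih]

-- A's second loop (insert-if over items with distinct fresh keys) produces exactly the filtered items
theorem selA_items (medalha : String) (M : Int) (l : List (String × PySem.Dict String Int))
    (hnd : (l.map Prod.fst).Nodup) :
    (l.foldl (fun f pr => if mmCnt medalha pr = M then PySem.Dict.insert f pr.1 pr.2 else f)
      (PySem.Dict.empty : PySem.Dict String (PySem.Dict String Int))).items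
      = l.filter (mmIs medalha M) := by
  have hfun : (fun (f : PySem.Dict String (PySem.Dict String Int)) (pr : String × PySem.Dict String Int) =>
      if mmCnt medalha pr = M then PySem.Dict.insert f pr.1 pr.2 else f)
      = (fun f pr => if mmIs medalha M pr then PySem.Dict.insert f pr.1 pr.2 else f) := by
    funext f pr
    by_cases h : mmCnt medalha pr = M <;> simp [mmIs, h]
  rw [hfun, foldl_if_eq_foldl_filter]
  have hfresh : ∀ pr ∈ l.filter (mmIs medalha M),
      (PySem.Dict.empty : PySem.Dict String (PySem.Dict String Int)).contains pr.1 = false := by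
    intro pr _; simp [PySem.Dict.contains_empty]
  have hnd' : ((l.filter (mmIs medalha M)).map Prod.fst).Nodup :=
    ((List.filter_sublist (l := l)).map Prod.fst).nodup hnd
  have := PySem.Dict.items_foldl_insert_fresh
      (l := l.filter (mmIs medalha M)) (k := Prod.fst) (v := Prod.snd)
      (d := (PySem.Dict.empty : PySem.Dict String (PySem.Dict String Int))) hfresh hnd'
  simpa using this

-- B's loop body, named for the proofs (definitionally the lambda in mais_medalhas_alt)
def bStep (medalha : String) (st : Int × PySem.Dict String (PySem.Dict String Int))
    (pr : String × PySem.Dict String Int) : Int × PySem.Dict String (PySem.Dict String Int) :=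
  let n := (pr.2.get? medalha).getD 0
  if n > st.1 then (n, PySem.Dict.insert PySem.Dict.empty pr.1 pr.2)
  else if n = st.1 then (st.1, PySem.Dict.insert st.2 pr.1 pr.2)
  else st

-- B's single pass computes the running maximum and the filtered-items dict
theorem altPass (medalha : String) (l : List (String × PySem.Dict String Int))
    (hnd : (l.map Prod.fst).Nodup) :
    (l.foldl (bStep medalha) (0, PySem.Dict.empty)).1 = mmMax medalha l ∧
    (l.foldl (bStep medalha) (0, PySem.Dict.empty)).2.items
      = l.filter (mmIs medalha (mmMax medalha l)) := by
  induction l using List.reverseRecOn with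
  | nil => exact ⟨rfl, rfl⟩
  | append_singleton l x ih =>
    have hnd' : (l.map Prod.fst).Nodup ∧ ([x.1] : List String).Nodup ∧
        ∀ a ∈ l.map Prod.fst, ∀ b ∈ ([x.1] : List String), a ≠ b := by
      rw [← List.nodup_append]
      simpa using hnd
    have hndl : (l.map Prod.fst).Nodup := hnd'.1
    have hx : x.1 ∉ l.map Prod.fst := fun hm => hnd'.2.2 x.1 hm x.1 (by simp) rfl
    obtain ⟨ih1, ih2⟩ := ih hndl
    have hle : ∀ pr ∈ l, mmCnt medalha pr ≤ mmMax medalha l := (mmMax_le medalha l 0).2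
    have hmax : mmMax medalha (l ++ [x])
        = if mmCnt medalha x > mmMax medalha l then mmCnt medalha x else mmMax medalha l := by
      simp only [mmMax, mmCnt, List.foldl_append, List.foldl_cons, List.foldl_nil]
    set D := (l.foldl (bStep medalha) (0, (PySem.Dict.empty : PySem.Dict String (PySem.Dict String Int)))).2 with hD
    have hpair : l.foldl (bStep medalha) (0, PySem.Dict.empty) = (mmMax medalha l, D) := by
      rw [Prod.ext_iff]; exact ⟨ih1, rfl⟩
    rw [List.foldl_append, hpair]
    simp only [List.foldl_cons, List.foldl_nil, bStep]
    rcases lt_trichotomy (mmCnt medalha x) (mmMax medalha l) with hlt | heq | hgt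
    · -- smaller count: state unchanged
      have h1 : ¬ ((x.2.get? medalha).getD 0 > (mmMax medalha l, D).1) := by
        show ¬ ((x.2.get? medalha).getD 0 > mmMax medalha l); simp only [mmCnt] at hlt; omega
      have h2 : ¬ ((x.2.get? medalha).getD 0 = (mmMax medalha l, D).1) := by
        show ¬ ((x.2.get? medalha).getD 0 = mmMax medalha l); simp only [mmCnt] at hlt; omega
      rw [if_neg h1, if_neg h2, hmax, if_neg (by omega)]
      refine ⟨rfl, ?_⟩
      rw [ih2, List.filter_append, List.filter_cons, List.filter_nil]
      split_ifs with hcond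
      · exfalso
        simp only [mmIs, mmCnt, decide_eq_true_eq] at hcond
        simp only [mmCnt] at hlt
        omega
      · simp
    · -- tie: the item is appended to the filter dict
      have h1 : ¬ ((x.2.get? medalha).getD 0 > (mmMax medalha l, D).1) := by
        show ¬ ((x.2.get? medalha).getD 0 > mmMax medalha l); simp only [mmCnt] at heq; omega
      have h2 : (x.2.get? medalha).getD 0 = (mmMax medalha l, D).1 := by
        show (x.2.get? medalha).getD 0 = mmMax medalha l; simpa [mmCnt] using heq
      rw [if_neg h1, if_pos h2, hmax, if_neg (by omega)]
      have hc : D.contains x.1 = false := by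
        cases h : D.contains x.1 with
        | false => rfl
        | true =>
          exfalso
          have hk := (PySem.Dict.contains_iff_mem_keys D x.1).mp h
          simp only [PySem.Dict.keys, ih2] at hk
          rcases List.mem_map.mp hk with ⟨pr, hpr, hpr1⟩
          exact hx (hpr1 ▸ List.mem_map_of_mem (List.mem_of_mem_filter hpr))
      refine ⟨rfl, ?_⟩
      have hins := PySem.Dict.items_insert_of_not_contains (d := D) (v := x.2) hc
      simp only at hins ⊢
      rw [hins, ih2, List.filter_append, List.filter_cons, List.filter_nil]
      split_ifs with hcond
      · simp
      · exfalso
        simp only [mmIs, mmCnt, decide_eq_true_eq] at hcond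
        simp only [mmCnt] at heq
        exact hcond heq
    · -- strictly larger count: reset
      have h1 : (x.2.get? medalha).getD 0 > (mmMax medalha l, D).1 := by
        show (x.2.get? medalha).getD 0 > mmMax medalha l; simpa [mmCnt] using hgt
      rw [if_pos h1, hmax, if_pos (by omega)]
      refine ⟨rfl, ?_⟩
      have hc : (PySem.Dict.empty : PySem.Dict String (PySem.Dict String Int)).contains x.1 = false := by
        simp [PySem.Dict.contains_empty]
      have hins := PySem.Dict.items_insert_of_not_contains
        (d := (PySem.Dict.empty : PySem.Dict String (PySem.Dict String Int))) (v := x.2) hc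
      simp only at hins ⊢
      rw [hins, List.filter_append, List.filter_cons, List.filter_nil]
      have hnil : List.filter (mmIs medalha (mmCnt medalha x)) l = [] := by
        rw [List.filter_eq_nil_iff]
        intro pr hpr
        have hp := hle pr hpr
        simp only [mmIs, mmCnt, decide_eq_true_eq]
        simp only [mmCnt] at hp hgt
        omega
      rw [hnil]
      split_ifs with hcond
      · simp [PySem.Dict.empty]
      · exfalso
        simp only [mmIs, decide_eq_true_eq] at hcond
        exact hcond trivial

-- ===== VERDICT (by name: the statement is the Claim_ definition above) =====
theorem mais_medalhas_spec : Claim_equal_mais_medalhas := by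
  intro medalha quadro _ _
  unfold Spec_mais_medalhas
  simp only [mais_medalhas, mais_medalhas_alt]
  set Q := mmDict quadro with hQ
  have hndk : Q.keys.Nodup := PySem.Dict.nodup_keys_ofList _
  have hnd : (Q.items.map Prod.fst).Nodup := by simpa [PySem.Dict.keys] using hndk
  have hget : ∀ pr ∈ Q.items, PySem.Dict.get? Q pr.1 = some pr.2 := by
    intro pr hpr
    exact PySem.Dict.get?_of_mem_items Q (by simpa using hpr) hndk
  have hstep : (fun (st : Int × PySem.Dict String (PySem.Dict String Int))
      (pr : String × PySem.Dict String Int) =>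
      let n := (pr.2.get? medalha).getD 0
      if n > st.1 then (n, PySem.Dict.insert PySem.Dict.empty pr.1 pr.2)
      else if n = st.1 then (st.1, PySem.Dict.insert st.2 pr.1 pr.2)
      else st) = bStep medalha := rfl
  -- A's first loop over keys = running maximum over the items
  have hmaior : (PySem.Dict.keys Q).foldl
      (fun m pais => if mmLookup Q pais medalha > m then mmLookup Q pais medalha else m) 0
      = mmMax medalha Q.items := by
    simp only [PySem.Dict.keys, List.foldl_map, mmMax]
    apply PySem.List.foldl_congr_mem'
    intro pr hpr acc
    simp [mmLookup, mmCnt, hget pr hpr]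
  rw [hmaior]
  -- A's second loop over keys = insert-if fold over the items
  have hfiltro : (PySem.Dict.keys Q).foldl
      (fun f pais => if mmLookup Q pais medalha = mmMax medalha Q.items
                     then PySem.Dict.insert f pais ((PySem.Dict.get? Q pais).getD PySem.Dict.empty) else f)
      PySem.Dict.empty
      = Q.items.foldl
        (fun f pr => if mmCnt medalha pr = mmMax medalha Q.items then PySem.Dict.insert f pr.1 pr.2 else f)
        PySem.Dict.empty := by
    simp only [PySem.Dict.keys, List.foldl_map]
    apply PySem.List.foldl_congr_mem'
    intro pr hpr acc
    simp [mmLookup, mmCnt, hget pr hpr]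
  rw [hfiltro, hstep]
  obtain ⟨h1, h2⟩ := altPass medalha Q.items hnd
  rw [selA_items medalha (mmMax medalha Q.items) Q.items hnd, ← h2]
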